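-- pv_equiv track=rewrite | github.com/glebapaulina/algorytmy | zadania.py | wiecej_ujemnych
-- ===== SOURCE A (Python) =====
-- def wiecej_ujemnych(tablica):
--     ujemne = 0
--     dodatnie = 0
--     for i in tablica:
--         if i < 0:
--             ujemne += 1
--         if i > 0:
--             dodatnie += 1
--     if ujemne > dodatnie:
--         return True
-- ===== SOURCE B (Python) =====
-- def wiecej_ujemnych(tablica):
--     # Sort, then pair off one negative (front) with one positive (back);
--     # a leftover negative at the front means negatives outnumber positives.
--     s = sorted(tablica)
--     while s and s[0] < 0 and s[-1] > 0:
--         s = s[1:-1]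
--     if s and s[0] < 0:
--         return True
-- ===== Notes on version B (the rewrite author's own statement) =====
-- stated objective: alternative
-- what changed: Replaces A's single-pass two-counter scan by sort-then-pair-off: sort the list, repeatedly strip one negative from the front paired with one positive from the back, and return True iff a negative is still left at the front.
import Mathlib
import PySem

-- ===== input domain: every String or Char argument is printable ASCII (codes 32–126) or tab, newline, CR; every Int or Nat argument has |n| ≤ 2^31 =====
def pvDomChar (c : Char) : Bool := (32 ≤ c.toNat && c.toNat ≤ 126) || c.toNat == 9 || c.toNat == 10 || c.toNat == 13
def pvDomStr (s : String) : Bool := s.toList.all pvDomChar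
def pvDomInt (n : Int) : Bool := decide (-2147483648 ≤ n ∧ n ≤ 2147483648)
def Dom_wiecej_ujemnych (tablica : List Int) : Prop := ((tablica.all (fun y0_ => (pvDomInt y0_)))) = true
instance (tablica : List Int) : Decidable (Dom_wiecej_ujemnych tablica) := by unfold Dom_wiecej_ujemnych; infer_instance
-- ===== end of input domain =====

-- B replaces A's two-counter scan by sort-then-pair-off (alternative algorithm, same return values).

-- ===== PORT A =====
-- Port of A: two counters over one loop, then return True only if ujemne > dodatnie (else Python's implicit None).
def wiecej_ujemnych (tablica : List Int) : Option Bool :=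
  let st := tablica.foldl (fun (p : Int × Int) i =>
    let p := if i < 0 then (p.1 + 1, p.2) else p
    if i > 0 then (p.1, p.2 + 1) else p) (0, 0)
  if st.1 > st.2 then some true else none

-- ===== PORT B =====
-- termination helper for the loop: s[1:-1] is tail.dropLast, strictly shorter on nonempty s
theorem pv_slice_one_neg_one (s : List Int) :
    PySem.List.slice s (some 1) (some (-1)) = s.tail.dropLast := by
  cases s with
  | nil => rfl
  | cons a t =>
    simp [PySem.List.slice, PySem.List.clampIdx, List.dropLast_eq_take]
    have h0 : ¬((t.length : Int) < 0) := by omega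
    simp [h0]
    try omega

-- Port of B's while loop: while s and s[0] < 0 and s[-1] > 0: s = s[1:-1]
def pairOff (s : List Int) : List Int :=
  if s ≠ [] ∧ s.headD 0 < 0 ∧ s.getLastD 0 > 0 then
    pairOff (PySem.List.slice s (some 1) (some (-1)))
  else s
termination_by s.length
decreasing_by
  rename_i h
  rw [pv_slice_one_neg_one]
  have hne : s ≠ [] := h.1
  cases s with
  | nil => simp at hne
  | cons a t =>
    simp only [List.tail_cons, List.length_dropLast, List.length_cons]
    omega

-- Port of B: sort; pair off a front negative with a back positive; leftover front negative ⇒ True.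
def wiecej_ujemnych_alt (tablica : List Int) : Option Bool :=
  let s := PySem.List.sorted tablica (fun x => x) false
  let s := pairOff s
  if s ≠ [] ∧ s.headD 0 < 0 then some true else none

-- ===== PRECONDITION & SPEC =====
def Spec_wiecej_ujemnych (tablica : List Int) (out : Option Bool) : Prop := out = wiecej_ujemnych_alt tablica
instance (tablica : List Int) (out : Option Bool) : Decidable (Spec_wiecej_ujemnych tablica out) := by unfold Spec_wiecej_ujemnych; infer_instance

-- ===== CLAIM (what is proved, stated in full; the proofs are below) =====
def Claim_equal_wiecej_ujemnych : Prop := ∀ (tablica : List Int), Dom_wiecej_ujemnych tablica → Spec_wiecej_ujemnych tablica (wiecej_ujemnych tablica)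

-- ===== LEMMAS AND PROOFS =====

-- A's fold computes the two sign counts.
theorem foldlA_counts (l : List Int) (u d : Int) :
    l.foldl (fun (p : Int × Int) i =>
      let p := if i < 0 then (p.1 + 1, p.2) else p
      if i > 0 then (p.1, p.2 + 1) else p) (u, d)
    = (u + (l.countP (fun x => decide (x < 0)) : Int),
       d + (l.countP (fun x => decide (x > 0)) : Int)) := by
  induction l generalizing u d with
  | nil => simp
  | cons x xs ih =>
    simp only [List.foldl_cons, List.countP_cons]
    by_cases h1 : x < 0 <;> by_cases h2 : x > 0
    · exact absurd h2 (by omega)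
    · simp only [h1, h2, if_true, if_false, decide_true, decide_false, ih, Prod.mk.injEq]
      constructor <;> push_cast <;> ring
    · simp only [h1, h2, if_true, if_false, decide_true, decide_false, ih, Prod.mk.injEq]
      constructor <;> push_cast <;> ring
    · simp only [h1, h2, if_false, decide_false, ih, Prod.mk.injEq]
      constructor <;> push_cast <;> ring
-- In a pairwise-ascending list every element is ≥ the head and ≤ the last.
theorem head_le_all (a : Int) (t : List Int) (h : (a :: t).Pairwise (· ≤ ·)) :
    ∀ x ∈ a :: t, a ≤ x := by
  intro x hx
  rcases List.mem_cons.mp hx with rfl | hx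
  · exact le_refl x
  · exact (List.pairwise_cons.mp h).1 x hx

theorem all_le_last (s : List Int) (h : s.Pairwise (· ≤ ·)) :
    ∀ x ∈ s, x ≤ s.getLastD 0 := by
  induction s with
  | nil => intro x hx; simp at hx
  | cons a t ih =>
    intro x hx
    cases t with
    | nil =>
      simp only [List.mem_singleton] at hx
      simp [hx]
    | cons b u =>
      have hpc := List.pairwise_cons.mp h
      have hlast_mem : (b :: u).getLastD 0 ∈ b :: u := by
        rw [List.getLastD_eq_getLast?, List.getLast?_eq_some_getLast (by simp : b :: u ≠ [])]
        exact List.getLast_mem _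
      rcases List.mem_cons.mp hx with hxa | hx'
      · rw [hxa]
        calc a ≤ (b :: u).getLastD 0 := hpc.1 _ hlast_mem
          _ = (a :: b :: u).getLastD 0 := by simp only [List.getLastD_cons]
      · calc x ≤ (b :: u).getLastD 0 := ih hpc.2 x hx'
          _ = (a :: b :: u).getLastD 0 := by simp only [List.getLastD_cons]

-- The pair-off loop decides "strictly more negatives than positives" on a sorted list.
theorem pairOff_spec (s : List Int) (hs : s.Pairwise (· ≤ ·)) :
    (pairOff s ≠ [] ∧ (pairOff s).headD 0 < 0)
      ↔ s.countP (fun x => decide (x > 0)) < s.countP (fun x => decide (x < 0)) := by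
  induction s using pairOff.induct with
  | case1 s hcond ih =>
    obtain ⟨hne, hh, hl⟩ := hcond
    rw [pairOff, if_pos ⟨hne, hh, hl⟩]
    rw [pv_slice_one_neg_one] at ih ⊢
    cases s with
    | nil => simp at hne
    | cons a t =>
      simp only [List.headD_cons] at hh
      simp only [List.tail_cons] at ih ⊢
      have htne : t ≠ [] := by
        intro h; subst h
        simp only [List.getLastD_cons, List.getLastD_nil] at hl
        omega
      have hl' : t.getLastD 0 > 0 := by
        cases t with
        | nil => exact absurd rfl htne
        | cons b u => simpa only [List.getLastD_cons] using hl
      have hgl : t.getLastD 0 = t.getLast htne := by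
        rw [List.getLastD_eq_getLast?, List.getLast?_eq_some_getLast htne]; rfl
      have hdecomp : t = t.dropLast ++ [t.getLastD 0] := by
        rw [hgl]; exact (List.dropLast_append_getLast htne).symm
      have hsub : (t.dropLast).Pairwise (fun a b => a ≤ b) := by
        have hsl : (t.dropLast).Sublist (a :: t) :=
          (List.dropLast_sublist t).trans (List.sublist_cons_self a t)
        exact hs.sublist hsl
      rw [ih hsub]
      have hcount : ∀ p : Int → Bool,
          (a :: t).countP p
          = (if p a then 1 else 0) + t.dropLast.countP p + (if p (t.getLastD 0) then 1 else 0) := by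
        intro p
        conv_lhs => rw [hdecomp]
        simp only [List.countP_cons, List.countP_append, List.countP_cons, List.countP_nil]
        omega
      rw [hcount, hcount]
      have h1 : (decide (a < 0)) = true := by rw [decide_eq_true_eq]; exact hh
      have h2 : (decide (a > 0)) = false := by rw [decide_eq_false_iff_not]; omega
      have h3 : (decide (t.getLastD 0 < 0)) = false := by rw [decide_eq_false_iff_not]; omega
      have h4 : (decide (t.getLastD 0 > 0)) = true := by rw [decide_eq_true_eq]; exact hl'
      rw [h1, h2, h3, h4]
      simp only [if_true]
      try simp only [reduceIte]
      omega
  | case2 s hcond =>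
    rw [pairOff, if_neg hcond]
    by_cases hne : s = []
    · subst hne; simp
    · by_cases hh : s.headD 0 < 0
      · have hl : ¬ s.getLastD 0 > 0 := fun hgt => hcond ⟨hne, hh, hgt⟩
        have hcp : s.countP (fun x => decide (x > 0)) = 0 := by
          rw [List.countP_eq_zero]
          intro x hx
          have := all_le_last s hs x hx
          simp only [decide_eq_true_eq, gt_iff_lt, not_lt]
          omega
        have hcn : 0 < s.countP (fun x => decide (x < 0)) := by
          rw [List.countP_pos_iff]
          cases s with
          | nil => exact absurd rfl hne
          | cons a t =>
            exact ⟨a, List.mem_cons_self, by simpa using hh⟩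
        exact iff_of_true ⟨hne, hh⟩ (by omega)
      · have hcn : s.countP (fun x => decide (x < 0)) = 0 := by
          rw [List.countP_eq_zero]
          intro x hx
          cases s with
          | nil => exact absurd rfl hne
          | cons a t =>
            have hax := head_le_all a t hs x hx
            simp only [List.headD_cons, not_lt] at hh
            simp only [decide_eq_true_eq, not_lt]
            omega
        exact iff_of_false (fun h => hh h.2) (by omega)

-- ===== VERDICT (by name: the statement is the Claim_ definition above) =====
theorem wiecej_ujemnych_spec : Claim_equal_wiecej_ujemnych := by
  intro tablica _
  unfold Spec_wiecej_ujemnych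
  simp only [wiecej_ujemnych, wiecej_ujemnych_alt]
  rw [foldlA_counts]
  have hperm : (PySem.List.sorted tablica (fun x => x) false).Perm tablica :=
    PySem.List.sorted_perm tablica (fun x => x) false
  have hpw : (PySem.List.sorted tablica (fun x => x) false).Pairwise (· ≤ ·) := by
    simpa using PySem.List.sorted_pairwise tablica (fun x => x)
  have hiff := pairOff_spec (PySem.List.sorted tablica (fun x => x) false) hpw
  rw [hperm.countP_eq, hperm.countP_eq] at hiff
  have hA : ((0 : Int) + (tablica.countP (fun x => decide (x < 0)) : Int)
        > (0 : Int) + (tablica.countP (fun x => decide (x > 0)) : Int))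
      ↔ tablica.countP (fun x => decide (x > 0)) < tablica.countP (fun x => decide (x < 0)) := by
    constructor <;> (intro h; push_cast at h ⊢; omega)
  by_cases hc : tablica.countP (fun x => decide (x > 0)) < tablica.countP (fun x => decide (x < 0))
  · rw [if_pos (hA.mpr hc), if_pos (hiff.mpr hc)]
  · rw [if_neg (fun h => hc (hA.mp h)), if_neg (fun h => hc (hiff.mp h))]
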